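-- pv_equiv track=rewrite | github.com/sueszli/vector-database-benchmark | dataset/python-mutated/array_expressions.py | _get_free_indices_to_position_map
-- ===== SOURCE A (Python) =====
-- def _get_free_indices_to_position_map(free_indices, contraction_indices):
--     if False:
--         return 10
--     free_indices_to_position = {}
--     flattened_contraction_indices = [j for i in contraction_indices for j in i]
--     counter = 0
--     for ind in free_indices:
--         while counter in flattened_contraction_indices:
--             counter += 1
--         free_indices_to_position[ind] = counter
--         counter += 1
--     return free_indices_to_position
-- ===== SOURCE B (Python) =====
-- def _get_free_indices_to_position_map(free_indices, contraction_indices):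
--     free = list(free_indices)
--     n = len(free)
--     taken = sorted({j for i in contraction_indices for j in i if j >= 0})
--     gaps = []
--     prev = 0
--     for t in taken:
--         if len(gaps) >= n:
--             break
--         width = min(t - prev, n - len(gaps))
--         gaps.extend(range(prev, prev + width))
--         prev = t + 1
--     gaps.extend(range(prev, prev + n - len(gaps)))
--     return dict(zip(free, gaps))
-- ===== Notes on version B (the rewrite author's own statement) =====
-- stated objective: faster
-- what changed: B sorts the distinct non-negative contraction positions and builds the available positions by enumerating the gaps between consecutive taken values in one merge-style sweep (no membership tests at all), then pairs them with the free indices via dict(zip(...)); A instead runs a skip-while membership scan over the flattened list for every free index.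
import Mathlib
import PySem

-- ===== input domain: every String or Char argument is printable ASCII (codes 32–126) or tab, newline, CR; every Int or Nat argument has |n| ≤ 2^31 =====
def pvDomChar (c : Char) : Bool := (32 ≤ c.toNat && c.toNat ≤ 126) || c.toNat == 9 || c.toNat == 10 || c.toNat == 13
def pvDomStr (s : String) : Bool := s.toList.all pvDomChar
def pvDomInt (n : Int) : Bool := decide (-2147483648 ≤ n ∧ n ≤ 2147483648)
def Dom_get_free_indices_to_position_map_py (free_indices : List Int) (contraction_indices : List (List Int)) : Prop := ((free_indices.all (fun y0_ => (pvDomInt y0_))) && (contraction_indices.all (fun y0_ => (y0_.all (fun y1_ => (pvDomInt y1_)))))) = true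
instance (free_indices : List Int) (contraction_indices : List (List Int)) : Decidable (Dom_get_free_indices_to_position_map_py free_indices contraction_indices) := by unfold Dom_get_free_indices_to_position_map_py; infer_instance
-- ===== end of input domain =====

-- B sorts the distinct non-negative contraction positions and enumerates the gaps between them
-- in one sweep (no membership tests), instead of A's per-free-index skip-while over the flattened list.


-- an upper bound on a list's elements, used only for termination of A's skip loop
def pvBound (fl : List Int) : Int := fl.foldr (fun x a => max (x + 1) a) 0

theorem pvBound_lt_of_mem {fl : List Int} {c : Int} (h : c ∈ fl) : c < pvBound fl := by
  induction fl with
  | nil => cases h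
  | cons x xs ih =>
    simp only [pvBound, List.foldr] at *
    rcases List.mem_cons.mp h with rfl | h'
    · omega
    · have := ih h'
      omega

-- ===== PORT A =====
-- while counter in flattened_contraction_indices: counter += 1
def pvSkipA (fl : List Int) (c : Int) : Int :=
  if h : c ∈ fl then pvSkipA fl (c + 1) else c
termination_by (pvBound fl - c).toNat
decreasing_by
  have := pvBound_lt_of_mem h
  omega

-- for ind in free_indices: … (state: the dict and the counter)
def pvLoopA (fl : List Int) (free : List Int) (d : PySem.Dict Int Int) (c : Int) : PySem.Dict Int Int :=
  match free with
  | [] => d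
  | ind :: rest =>
    let c' := pvSkipA fl c
    pvLoopA fl rest (d.insert ind c') (c' + 1)

def get_free_indices_to_position_map_py (free_indices : List Int) (contraction_indices : List (List Int)) : List (Int × Int) :=
  let flattened_contraction_indices := contraction_indices.flatMap (fun i => i)
  (pvLoopA flattened_contraction_indices free_indices PySem.Dict.empty 0).items

-- ===== PORT B =====
-- for t in taken: if len(gaps) >= n: break; width = min(t-prev, n-len(gaps)); gaps += range(prev, prev+width); prev = t+1
def pvGapLoop (n : Int) (taken : List Int) (gaps : List Int) (prev : Int) : List Int × Int :=
  match taken with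
  | [] => (gaps, prev)
  | t :: rest =>
    if n ≤ (gaps.length : Int) then (gaps, prev)
    else
      let width := min (t - prev) (n - (gaps.length : Int))
      pvGapLoop n rest (gaps ++ PySem.List.pyRange prev (prev + width) 1) (t + 1)

def get_free_indices_to_position_map_py_alt (free_indices : List Int) (contraction_indices : List (List Int)) : List (Int × Int) :=
  let n : Int := free_indices.length
  let taken := PySem.List.sorted (PySem.Set.ofList ((contraction_indices.flatMap (fun i => i)).filter (fun j => decide (0 ≤ j)))) (fun x => x) false
  let st := pvGapLoop n taken [] 0
  let gaps := st.1 ++ PySem.List.pyRange st.2 (st.2 + (n - (st.1.length : Int))) 1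
  (PySem.Dict.ofList (free_indices.zip gaps)).items

-- ===== PRECONDITION & SPEC =====
def Spec_get_free_indices_to_position_map_py (free_indices : List Int) (contraction_indices : List (List Int)) (out : List (Int × Int)) : Prop := out = get_free_indices_to_position_map_py_alt free_indices contraction_indices
instance (free_indices : List Int) (contraction_indices : List (List Int)) (out : List (Int × Int)) : Decidable (Spec_get_free_indices_to_position_map_py free_indices contraction_indices out) := by unfold Spec_get_free_indices_to_position_map_py; infer_instance

-- ===== CLAIM (what is proved, stated in full; the proofs are below) =====
def Claim_equal_get_free_indices_to_position_map_py : Prop := ∀ (free_indices : List Int) (contraction_indices : List (List Int)), Dom_get_free_indices_to_position_map_py free_indices contraction_indices → Spec_get_free_indices_to_position_map_py free_indices contraction_indices (get_free_indices_to_position_map_py free_indices contraction_indices)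

-- ===== LEMMAS AND PROOFS =====

-- the first k positions A's skip loop yields starting at p
def pvAvail (fl : List Int) (k : Nat) (p : Int) : List Int :=
  match k with
  | 0 => []
  | m + 1 =>
    let q := pvSkipA fl p
    q :: pvAvail fl m (q + 1)

theorem loopA_eq_foldl (fl : List Int) (free : List Int) :
    ∀ (c : Int) (d : PySem.Dict Int Int),
      pvLoopA fl free d c =
        (free.zip (pvAvail fl free.length c)).foldl
          (fun d p => d.insert p.1 p.2) d := by
  induction free with
  | nil => intro c d; simp [pvLoopA, pvAvail]
  | cons a rest ih =>
    intro c d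
    simp only [pvLoopA, List.length_cons, pvAvail, List.zip_cons_cons, List.foldl_cons]
    rw [ih]

theorem skipA_not_mem {fl : List Int} {p : Int} (h : p ∉ fl) : pvSkipA fl p = p := by
  rw [pvSkipA]; simp [h]

theorem skipA_mem {fl : List Int} {p : Int} (h : p ∈ fl) : pvSkipA fl p = pvSkipA fl (p + 1) := by
  rw [pvSkipA]; simp [h]

-- an interval free of taken positions is copied verbatim from the stream
theorem avail_split (fl : List Int) (w : Nat) :
    ∀ (k : Nat) (p : Int), w ≤ k → (∀ x, p ≤ x → x < p + w → x ∉ fl) →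
      pvAvail fl k p = PySem.List.pyRange p (p + w) 1 ++ pvAvail fl (k - w) (p + w) := by
  induction w with
  | zero =>
    intro k p _ _
    simp [PySem.List.pyRange_one_eq_nil]
  | succ m ih =>
    intro k p hk hfree
    obtain ⟨k', rfl⟩ : ∃ k', k = k' + 1 := ⟨k - 1, by omega⟩
    have hp : p ∉ fl := hfree p le_rfl (by push_cast; omega)
    rw [pvAvail]
    simp only [skipA_not_mem hp]
    rw [PySem.List.pyRange_one_cons (by push_cast; omega)]
    have e1 : (p + 1) + (m : Int) = p + ((m + 1 : Nat) : Int) := by push_cast; ring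
    have e2 : k' - m = (k' + 1) - (m + 1) := (Nat.succ_sub_succ k' m).symm
    have := ih k' (p + 1) (by omega) (fun x h1 h2 => hfree x (by omega) (by push_cast at h2 ⊢; omega))
    rw [e1, e2] at this
    rw [this]
    simp

theorem avail_skip_taken (fl : List Int) (k : Nat) (t : Int) (ht : t ∈ fl) :
    pvAvail fl k t = pvAvail fl k (t + 1) := by
  cases k with
  | zero => rfl
  | succ m => simp only [pvAvail, skipA_mem ht]

-- finalize: the trailing extend of Source B
def pvFin (n : Int) (st : List Int × Int) : List Int :=
  st.1 ++ PySem.List.pyRange st.2 (st.2 + (n - (st.1.length : Int))) 1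

theorem gaploop_full (n : Int) (taken : List Int) (gaps : List Int) (prev : Int)
    (h : n ≤ (gaps.length : Int)) : pvFin n (pvGapLoop n taken gaps prev) = gaps := by
  cases taken with
  | nil =>
    simp only [pvGapLoop, pvFin]
    rw [PySem.List.pyRange_one_eq_nil (by omega)]
    simp
  | cons t rest =>
    simp only [pvGapLoop, if_pos h, pvFin]
    rw [PySem.List.pyRange_one_eq_nil (by omega)]
    simp

-- an Int-bound range equals its toNat-bound twin (negative width: both empty)
theorem pyRange_toNat (p m : Int) :
    PySem.List.pyRange p (p + m) 1 = PySem.List.pyRange p (p + (m.toNat : Int)) 1 := by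
  by_cases h : 0 ≤ m
  · rw [Int.toNat_of_nonneg h]
  · rw [PySem.List.pyRange_one_eq_nil (by omega), PySem.List.pyRange_one_eq_nil (by omega)]

-- main invariant: the gap sweep over the sorted taken list produces exactly the skip stream
theorem gaploop_eq_avail (fl : List Int) (n : Int) (taken : List Int) :
    ∀ (gaps : List Int) (prev : Int),
      taken.Pairwise (· < ·) →
      (∀ x, prev ≤ x → (x ∈ taken ↔ x ∈ fl)) →
      (∀ x ∈ taken, prev ≤ x) →
      pvFin n (pvGapLoop n taken gaps prev) =
        gaps ++ pvAvail fl (n - (gaps.length : Int)).toNat prev := by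
  induction taken with
  | nil =>
    intro gaps prev _ hmem _
    simp only [pvGapLoop, pvFin]
    rw [avail_split fl (n - (gaps.length : Int)).toNat _ prev le_rfl
      (fun x h1 _ => fun hx => by have := (hmem x h1).mpr hx; simp at this)]
    rw [← pyRange_toNat]
    simp [pvAvail]
  | cons t rest ih =>
    intro gaps prev hpw hmem hge
    by_cases hfull : n ≤ (gaps.length : Int)
    · rw [pvGapLoop]
      simp only [hfull, if_true]
      have h0 : (n - (gaps.length : Int)).toNat = 0 := by omega
      simp only [pvFin, h0, pvAvail]
      rw [PySem.List.pyRange_one_eq_nil (by omega)]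
    · rw [pvGapLoop]
      simp only [hfull, if_false]
      have htp : prev ≤ t := hge t (List.mem_cons_self ..)
      have hrest_gt : ∀ x ∈ rest, t < x := fun x hx => (List.pairwise_cons.mp hpw).1 x hx
      set k : Nat := (n - (gaps.length : Int)).toNat with hk
      set w : Int := min (t - prev) (n - (gaps.length : Int)) with hw
      have hw0 : 0 ≤ w := by omega
      have hwn : ((w.toNat : Nat) : Int) = w := Int.toNat_of_nonneg hw0
      -- positions in [prev, prev + w) are not taken
      have hgapfree : ∀ x, prev ≤ x → x < prev + w → x ∉ fl := by
        intro x h1 h2 hx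
        have hxm : x ∈ t :: rest := (hmem x h1).mpr hx
        rcases List.mem_cons.mp hxm with rfl | hxr
        · omega
        · have := hrest_gt x hxr; omega
      have hsplit := avail_split fl w.toNat k prev (by omega) (by
        intro x h1 h2; exact hgapfree x h1 (by omega))
      have hlw : ((gaps ++ PySem.List.pyRange prev (prev + w) 1).length : Int)
          = (gaps.length : Int) + w := by
        have : (PySem.List.pyRange prev (prev + w) 1).length = (prev + w - prev).toNat :=
          PySem.List.length_pyRange_one _ _
        simp only [List.length_append, this]
        push_cast; omega
      by_cases hcase : t - prev ≤ n - (gaps.length : Int)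
      · -- full gap copied; continue past t
        have hne : prev + w = t := by omega
        rw [ih (gaps ++ PySem.List.pyRange prev (prev + w) 1) (t + 1)
            (List.pairwise_cons.mp hpw).2
            (by
              intro x hx
              constructor
              · intro hxr; exact (hmem x (by omega)).mp (List.mem_cons_of_mem _ hxr)
              · intro hxf
                have := (hmem x (by omega)).mpr hxf
                rcases List.mem_cons.mp this with rfl | h'
                · omega
                · exact h')
            (fun x hx => by have := hrest_gt x hx; omega)]
        rw [hsplit, hwn, hne]
        have ht_fl : t ∈ fl := (hmem t htp).mp (List.mem_cons_self ..)
        rw [avail_skip_taken fl (k - w.toNat) t ht_fl]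
        rw [List.append_assoc]
        rw [hne] at hlw
        have hlen2 : (n - ((gaps ++ PySem.List.pyRange prev t 1).length : Int)).toNat
            = k - w.toNat := by
          rw [hlw]; omega
        rw [hlen2]
      · -- gap wider than what is still needed: the sweep finishes here
        rw [gaploop_full n rest _ (t + 1) (by rw [hlw]; omega)]
        rw [hsplit, hwn]
        have h0 : k - w.toNat = 0 := by omega
        simp [h0, pvAvail]

theorem dict_ofList_eq_foldl (ps : List (Int × Int)) :
    PySem.Dict.ofList ps = ps.foldl (fun d p => d.insert p.1 p.2) PySem.Dict.empty := by
  rfl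

-- the sorted distinct non-negative taken list seen by B agrees with A's flattened list above 0
theorem sortedT_spec (fl : List Int) :
    (PySem.List.sorted (PySem.Set.ofList (fl.filter (fun j => decide (0 ≤ j)))) (fun x => x) false).Pairwise (· < ·)
    ∧ (∀ x : Int, (0 : Int) ≤ x →
        (x ∈ PySem.List.sorted (PySem.Set.ofList (fl.filter (fun j => decide (0 ≤ j)))) (fun x => x) false ↔ x ∈ fl))
    ∧ (∀ x ∈ PySem.List.sorted (PySem.Set.ofList (fl.filter (fun j => decide (0 ≤ j)))) (fun x => x) false, (0:Int) ≤ x) := by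
  refine ⟨PySem.List.sorted_ofList_pairwise_lt _, ?_, ?_⟩
  · intro x hx
    rw [PySem.List.mem_sorted, PySem.Set.mem_ofList, List.mem_filter]
    simp [hx]
  · intro x hx
    rw [PySem.List.mem_sorted, PySem.Set.mem_ofList, List.mem_filter] at hx
    simpa using hx.2

-- ===== VERDICT (by name: the statement is the Claim_ definition above) =====
theorem get_free_indices_to_position_map_py_spec : Claim_equal_get_free_indices_to_position_map_py := by
  intro free ci _
  show (pvLoopA (ci.flatMap (fun i => i)) free PySem.Dict.empty 0).items = _
  set fl := ci.flatMap (fun i => i) with hfl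
  obtain ⟨hpw, hmem, hge⟩ := sortedT_spec fl
  rw [loopA_eq_foldl, ← dict_ofList_eq_foldl]
  rw [show get_free_indices_to_position_map_py_alt free ci =
      (PySem.Dict.ofList (free.zip (pvFin (free.length : Int)
        (pvGapLoop (free.length : Int)
          (PySem.List.sorted (PySem.Set.ofList (fl.filter (fun j => decide (0 ≤ j)))) (fun x => x) false)
          [] 0)))).items from rfl]
  rw [gaploop_eq_avail fl (free.length : Int)
      (PySem.List.sorted (PySem.Set.ofList (fl.filter (fun j => decide (0 ≤ j)))) (fun x => x) false)
      [] 0 hpw hmem hge]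
  simp
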